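-- pv_equiv track=rewrite | github.com/jeffli678/cyber262-ctf-challenges | assignment-2.py | get_program_stat
-- ===== SOURCE A (Python) =====
-- def extract_program_name(line, start_delimiter, end_delimiter):
--
--     name_start = line.find(start_delimiter)
--     name_end = line.find(end_delimiter, name_start + 1)
--     name = line[name_start + 1 : name_end]
--     return name
--
-- def get_program_stat(lines):
--
--     program_names = []
--     timestamps = []
--
--     line_num = 0
--     for line in lines:
--         if ' execve(' in line:
--             name = extract_program_name(line, '"', '"')
--             if name not in program_names:
--                 program_names.append(name)
--                 timestamps.append([line_num])
--             else:
--                 idx = program_names.index(name)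
--                 timestamps[idx].append(line_num)
--
--         line_num += 1
--
--     return (program_names, timestamps)
-- ===== SOURCE B (Python) =====
-- def extract_program_name(line, start_delimiter, end_delimiter):
--     name_start = line.find(start_delimiter)
--     name_end = line.find(end_delimiter, name_start + 1)
--     return line[name_start + 1 : name_end]
--
-- def get_program_stat(lines):
--     # stage 1: materialize all execve events as (name, line_num) pairs
--     events = [(extract_program_name(line, '"', '"'), line_num)
--               for line_num, line in enumerate(lines)
--               if ' execve(' in line]
--     # stage 2: distinct names in first-appearance order
--     names = list(dict.fromkeys(name for name, _ in events))
--     # stage 3: rebuild each group by a per-name scan of the event list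
--     timestamps = [[ln for n, ln in events if n == name] for name in names]
--     return (names, timestamps)
-- ===== Notes on version B (the rewrite author's own statement) =====
-- stated objective: alternative
-- what changed: Replaces A's single pass maintaining parallel lists with membership/index scans by three staged passes: materialize an event list of (name, line_num) pairs, deduplicate names in first-appearance order with dict.fromkeys, then rebuild each group by filtering the event list per name.
import Mathlib
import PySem

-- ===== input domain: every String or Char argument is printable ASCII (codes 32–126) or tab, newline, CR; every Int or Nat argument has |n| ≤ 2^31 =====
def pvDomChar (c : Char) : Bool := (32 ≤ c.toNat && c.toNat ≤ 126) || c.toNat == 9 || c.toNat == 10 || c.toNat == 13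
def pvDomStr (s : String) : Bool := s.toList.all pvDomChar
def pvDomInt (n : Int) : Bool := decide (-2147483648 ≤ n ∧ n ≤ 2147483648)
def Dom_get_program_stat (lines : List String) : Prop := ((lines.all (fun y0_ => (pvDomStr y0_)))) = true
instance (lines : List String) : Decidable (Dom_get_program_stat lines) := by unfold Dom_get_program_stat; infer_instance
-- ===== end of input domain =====

-- B rebuilds the result in three staged passes (event list, dedup of names, per-name
-- filter of the events) instead of A's single pass over parallel lists; alternative.

-- ===== PORT A =====
-- extract_program_name(line, start_delimiter, end_delimiter)
def extract_program_name (line start_delimiter end_delimiter : String) : String :=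
  let name_start := PySem.Str.find line start_delimiter
  let name_end := PySem.Str.findFrom line end_delimiter (name_start + 1)
  PySem.Str.slice line (some (name_start + 1)) (some name_end)

-- timestamps[idx].append(line_num)
def pvAppendAt (stamps : List (List Int)) (idx : Nat) (n : Int) : List (List Int) :=
  match stamps, idx with
  | [], _ => []
  | s :: ss, 0 => (s ++ [n]) :: ss
  | s :: ss, k + 1 => s :: pvAppendAt ss k n

-- body of A's for-loop, state = ((program_names, timestamps), line_num)
def pvAStep (st : (List String × List (List Int)) × Int) (line : String) :
    (List String × List (List Int)) × Int :=
  let names := st.1.1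
  let stamps := st.1.2
  let ln := st.2
  if PySem.Str.isIn " execve(" line then
    let name := extract_program_name line "\"" "\""
    if name ∈ names then
      match PySem.List.index? names name with
      | some idx => ((names, pvAppendAt stamps idx ln), ln + 1)
      | none => ((names, stamps), ln + 1)   -- unreachable: name ∈ names
    else
      ((names ++ [name], stamps ++ [[ln]]), ln + 1)
  else
    ((names, stamps), ln + 1)

def get_program_stat (lines : List String) : List String × List (List Int) :=
  (lines.foldl pvAStep (([], []), 0)).1

-- ===== PORT B =====
-- the event-list comprehension: [(extract…, line_num) for line_num, line in enumerate(lines) if ' execve(' in line]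
def pvEvents (lines : List String) (start : Int) : List (String × Int) :=
  ((PySem.List.enumerate lines start).filter (fun p => PySem.Str.isIn " execve(" p.2)).map
    (fun p => (extract_program_name p.2 "\"" "\"", p.1))

def get_program_stat_alt (lines : List String) : List String × List (List Int) :=
  let events := pvEvents lines 0
  let names := PySem.List.dedup (events.map (fun e => e.1))
  (names, names.map (fun name => (events.filter (fun e => e.1 == name)).map (fun e => e.2)))

-- ===== PRECONDITION & SPEC =====
def Spec_get_program_stat (lines : List String) (out : List String × List (List Int)) : Prop := out = get_program_stat_alt lines
instance (lines : List String) (out : List String × List (List Int)) : Decidable (Spec_get_program_stat lines out) := by unfold Spec_get_program_stat; infer_instance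

-- ===== CLAIM (what is proved, stated in full; the proofs are below) =====
def Claim_equal_get_program_stat : Prop := ∀ (lines : List String), Dom_get_program_stat lines → Spec_get_program_stat lines (get_program_stat lines)

-- ===== LEMMAS AND PROOFS =====

-- the names / timestamps that B's last two passes produce from an event list E
def pvSpecN (E : List (String × Int)) : List String :=
  PySem.List.dedup (E.map (fun e => e.1))
def pvSpecS (E : List (String × Int)) : List (List Int) :=
  (pvSpecN E).map (fun name => (E.filter (fun e => e.1 == name)).map (fun e => e.2))

theorem pv_specN_snoc (E : List (String × Int)) (n : String) (i : Int) :
    pvSpecN (E ++ [(n, i)]) =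
      if n ∈ pvSpecN E then pvSpecN E else pvSpecN E ++ [n] := by
  simp only [pvSpecN, PySem.List.dedup_eq_ofList, PySem.Set.ofList_eq_foldl, List.map_append,
    List.map_cons, List.map_nil, List.foldl_append, List.foldl_cons, List.foldl_nil,
    PySem.Set.add, PySem.Set.contains]
  simp [List.contains_eq_mem]

theorem pv_filter_notmem (E : List (String × Int)) (name : String)
    (h : name ∉ pvSpecN E) : E.filter (fun e => e.1 == name) = [] := by
  rw [List.filter_eq_nil_iff]
  intro e he
  have : e.1 ∈ pvSpecN E := by
    simp only [pvSpecN, PySem.List.mem_dedup]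
    exact List.mem_map_of_mem he
  simp only [beq_eq_false_iff_ne, ne_eq, Bool.not_eq_true, beq_iff_eq]
  exact fun hc => h (hc ▸ this)

-- appending the event (n, i) to E updates exactly the group at n's first index
theorem pv_map_snoc (names : List String) (E : List (String × Int)) (n : String) (i : Int)
    (idx : Nat) (hnd : names.Nodup) (hi : PySem.List.index? names n = some idx) :
    names.map (fun name => ((E ++ [(n, i)]).filter (fun e => e.1 == name)).map (fun e => e.2))
      = pvAppendAt
          (names.map (fun name => (E.filter (fun e => e.1 == name)).map (fun e => e.2)))
          idx i := by
  induction names generalizing idx with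
  | nil => simp [PySem.List.index?] at hi
  | cons a ns ih =>
    rw [PySem.List.index?_eq_idxOf?] at hi
    by_cases ha : n = a
    · subst ha
      simp only [List.idxOf?_cons, BEq.rfl, if_true] at hi
      cases hi
      have hnotin : n ∉ ns := (List.nodup_cons.mp hnd).1
      simp only [List.map_cons, pvAppendAt, List.filter_append, List.map_append]
      congr 1
      · simp
      · refine List.map_congr_left ?_
        intro name hm
        have hne : (n == name) = false := by
          simp only [beq_eq_false_iff_ne, ne_eq]
          exact fun h => hnotin (h ▸ hm)
        simp [List.filter_append, hne]
    · have ha' : (a == n) = false := by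
        simp only [beq_eq_false_iff_ne, ne_eq]
        exact fun h => ha h.symm
      simp only [List.idxOf?_cons, ha', Bool.false_eq_true, if_false] at hi
      obtain ⟨j, hj, rfl⟩ := Option.map_eq_some_iff.mp hi
      have hne : (n == a) = false := by simp [ha]
      simp only [List.map_cons, pvAppendAt]
      congr 1
      · simp [List.filter_append, hne]
      · exact ih j (List.nodup_cons.mp hnd).2 (by rw [PySem.List.index?_eq_idxOf?]; exact hj)

theorem pv_events_cons (line : String) (rest : List String) (ln : Int) :
    pvEvents (line :: rest) ln =
      (if PySem.Str.isIn " execve(" line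
        then [(extract_program_name line "\"" "\"", ln)] else [])
        ++ pvEvents rest (ln + 1) := by
  simp only [pvEvents, PySem.List.enumerate_cons, List.filter_cons]
  by_cases h : PySem.Str.isIn " execve(" line = true
  · rw [if_pos h, if_pos h]; simp
  · rw [if_neg h, if_neg h]; simp

-- the staged passes over an extended event list reproduce A's loop state
theorem pv_loop (lines : List String) (E : List (String × Int)) (ln : Int) :
    (lines.foldl pvAStep ((pvSpecN E, pvSpecS E), ln)).1
      = (pvSpecN (E ++ pvEvents lines ln), pvSpecS (E ++ pvEvents lines ln)) := by
  induction lines generalizing E ln with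
  | nil => simp [pvEvents]
  | cons line rest ih =>
    rw [List.foldl_cons, pv_events_cons]
    by_cases hex : PySem.Str.isIn " execve(" line = true
    case neg =>
      have hstep : pvAStep ((pvSpecN E, pvSpecS E), ln) line = ((pvSpecN E, pvSpecS E), ln + 1) := by
        simp only [pvAStep]; rw [if_neg hex]
      rw [hstep, if_neg hex]
      simpa using ih E (ln + 1)
    case pos =>
      set name := extract_program_name line "\"" "\"" with hname
      have hEx : (E ++ ([(name, ln)] ++ pvEvents rest (ln + 1)))
          = (E ++ [(name, ln)]) ++ pvEvents rest (ln + 1) := by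
        rw [List.append_assoc]
      by_cases hmem : name ∈ pvSpecN E
      · obtain ⟨idx, hi⟩ := Option.isSome_iff_exists.mp
          ((PySem.List.index?_isSome_iff (pvSpecN E) name).mpr hmem)
        have hN : pvSpecN (E ++ [(name, ln)]) = pvSpecN E := by
          rw [pv_specN_snoc, if_pos hmem]
        have hS : pvSpecS (E ++ [(name, ln)]) = pvAppendAt (pvSpecS E) idx ln := by
          simp only [pvSpecS, hN]
          exact pv_map_snoc (pvSpecN E) E name ln idx
            (by simp [pvSpecN, PySem.List.dedup_eq_ofList, PySem.Set.nodup_ofList]) hi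
        have hstep : pvAStep ((pvSpecN E, pvSpecS E), ln) line
            = ((pvSpecN E, pvAppendAt (pvSpecS E) idx ln), ln + 1) := by
          simp only [pvAStep]
          rw [if_pos hex, ← hname, if_pos hmem, hi]
        rw [hstep, if_pos hex, hEx, ← hN, ← hS]
        exact ih (E ++ [(name, ln)]) (ln + 1)
      · have hN : pvSpecN (E ++ [(name, ln)]) = pvSpecN E ++ [name] := by
          rw [pv_specN_snoc, if_neg hmem]
        have hS : pvSpecS (E ++ [(name, ln)]) = pvSpecS E ++ [[ln]] := by
          simp only [pvSpecS, hN, List.map_append, List.map_cons, List.map_nil]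
          congr 1
          · refine List.map_congr_left ?_
            intro nm hm
            have hne : (name == nm) = false := by
              simp only [beq_eq_false_iff_ne, ne_eq]
              exact fun h => hmem (h ▸ hm)
            simp [List.filter_append, hne]
          · simp [List.filter_append, pv_filter_notmem E name hmem]
        have hstep : pvAStep ((pvSpecN E, pvSpecS E), ln) line
            = ((pvSpecN E ++ [name], pvSpecS E ++ [[ln]]), ln + 1) := by
          simp only [pvAStep]
          rw [if_pos hex, ← hname, if_neg hmem]
        rw [hstep, if_pos hex, hEx, ← hN, ← hS]
        exact ih (E ++ [(name, ln)]) (ln + 1)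

-- ===== VERDICT (by name: the statement is the Claim_ definition above) =====
theorem get_program_stat_spec : Claim_equal_get_program_stat := by
  intro lines _
  unfold Spec_get_program_stat get_program_stat get_program_stat_alt
  have h := pv_loop lines [] 0
  simp only [pvSpecN, pvSpecS, List.map_nil, PySem.List.dedup] at h ⊢
  simpa using h
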